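-- pv_equiv track=rewrite | github.com/seba1204/cours | info/seance-02/code/exercice_4.py | listSentence
-- ===== SOURCE A (Python) =====
-- def listSentence(sentence):
--     result, a = [], ''
--     for char in sentence:
--         if char == ' ':
--             result.append(a)
--             a = ''
--         else:
--             a += char
--     return result
-- ===== SOURCE B (Python) =====
-- def listSentence(sentence):
--     return sentence.split(' ')[:-1]
-- ===== Notes on version B (the rewrite author's own statement) =====
-- stated objective: faster
-- what changed: Replaces the explicit character loop with accumulator-and-flush by a single str.split with a space separator followed by slicing off the last element.
import Mathlib
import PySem

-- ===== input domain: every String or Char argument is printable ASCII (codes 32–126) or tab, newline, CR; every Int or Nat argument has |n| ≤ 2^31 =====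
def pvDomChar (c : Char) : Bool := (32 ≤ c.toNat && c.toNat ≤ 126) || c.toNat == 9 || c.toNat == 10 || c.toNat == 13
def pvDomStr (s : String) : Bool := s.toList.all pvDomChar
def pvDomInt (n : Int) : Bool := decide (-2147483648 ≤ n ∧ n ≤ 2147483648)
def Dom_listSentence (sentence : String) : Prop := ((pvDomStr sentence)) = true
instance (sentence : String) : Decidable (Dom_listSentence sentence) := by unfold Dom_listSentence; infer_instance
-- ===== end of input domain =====

-- B replaces A's explicit character loop (accumulate a word, flush on each ' ') by one
-- split(' ') call followed by dropping the last element ([:-1]); objective: idiomatic.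

-- ===== PORT A =====
-- the for-loop over the characters with state (result, a); 'a' is kept as its char list
def listSentence (sentence : String) : List String :=
  (sentence.toList.foldl
    (fun (st : List String × List Char) c =>
      if c = ' ' then (st.1 ++ [String.ofList st.2], []) else (st.1, st.2 ++ [c]))
    ([], [])).1

-- ===== PORT B =====
-- sentence.split(' ') → PySem.Chars.splitOn (the sep ≠ "" form of str.split); [:-1] → slice
def listSentence_alt (sentence : String) : List String :=
  PySem.List.slice ((PySem.Chars.splitOn sentence.toList [' ']).map String.ofList) none (some (-1))

-- ===== PRECONDITION & SPEC =====
def Spec_listSentence (sentence : String) (out : List String) : Prop := out = listSentence_alt sentence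
instance (sentence : String) (out : List String) : Decidable (Spec_listSentence sentence out) := by unfold Spec_listSentence; infer_instance

-- ===== CLAIM (what is proved, stated in full; the proofs are below) =====
def Claim_equal_listSentence : Prop := ∀ (sentence : String), Dom_listSentence sentence → Spec_listSentence sentence (listSentence sentence)

-- ===== LEMMAS AND PROOFS =====

-- spec-level splitter on a single space, with the current partial word up front
def pvSplit (cur : List Char) : List Char → List (List Char)
  | [] => [cur]
  | c :: rest => if c = ' ' then cur :: pvSplit [] rest else pvSplit (cur ++ [c]) rest

theorem pvSplit_ne_nil (cur : List Char) (l : List Char) : pvSplit cur l ≠ [] := by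
  induction l generalizing cur with
  | nil => simp [pvSplit]
  | cons c rest ih => by_cases h : c = ' ' <;> simp [pvSplit, h, ih]

theorem splitOn_go_eq (l : List Char) : ∀ (fuel : Nat) (cur : List Char)
    (acc : List (List Char)), l.length < fuel →
    PySem.Chars.splitOn.go [' '] fuel l cur acc = acc.reverse ++ pvSplit cur.reverse l := by
  induction l with
  | nil =>
    intro fuel cur acc h
    match fuel with
    | fuel + 1 => rw [PySem.Chars.splitOn.go.eq_def]; simp [pvSplit]
  | cons c rest ih =>
    intro fuel cur acc h
    match fuel with
    | fuel + 1 =>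
      rw [PySem.Chars.splitOn.go.eq_def]
      simp only [List.length_cons] at h
      by_cases hc : c = ' '
      · subst hc
        simp only [List.isPrefixOf, List.length_cons, List.length_nil,
          List.drop_succ_cons, List.drop_zero]
        rw [ih fuel [] (cur.reverse :: acc) (by omega)]
        simp [pvSplit]
      · have hpre : ([' '] : List Char).isPrefixOf (c :: rest) = false := by
          simp [List.isPrefixOf]; intro hxx; exact hc hxx.symm
        simp only [hpre, Bool.false_eq_true, if_false]
        rw [ih fuel (c :: cur) acc (by omega)]
        simp [pvSplit, hc]

theorem splitOn_eq (s : List Char) : PySem.Chars.splitOn s [' '] = pvSplit [] s := by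
  show PySem.Chars.splitOn.go [' '] (s.length + 1) s [] [] = _
  rw [splitOn_go_eq s (s.length + 1) [] [] (by omega)]
  simp

theorem foldA_eq (l : List Char) : ∀ (res : List String) (cur : List Char),
    (l.foldl
      (fun (st : List String × List Char) c =>
        if c = ' ' then (st.1 ++ [String.ofList st.2], []) else (st.1, st.2 ++ [c]))
      (res, cur)).1 = res ++ ((pvSplit cur l).dropLast).map String.ofList := by
  induction l with
  | nil => intro res cur; simp [pvSplit]
  | cons c rest ih =>
    intro res cur
    by_cases hc : c = ' '
    · subst hc
      simp only [List.foldl_cons, if_true]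
      rw [ih (res ++ [String.ofList cur]) []]
      simp [pvSplit, List.dropLast_cons_of_ne_nil (pvSplit_ne_nil [] rest)]
    · simp only [List.foldl_cons, if_neg hc]
      rw [ih res (cur ++ [c])]
      simp [pvSplit, hc]

theorem alt_eq_dropLast (sentence : String) :
    listSentence_alt sentence
      = ((pvSplit [] sentence.toList).map String.ofList).dropLast := by
  unfold listSentence_alt
  rw [splitOn_eq]
  have hne : (pvSplit [] sentence.toList).map String.ofList ≠ [] := by
    simp [pvSplit_ne_nil]
  have hlen : 1 ≤ ((pvSplit [] sentence.toList).map String.ofList).length :=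
    List.length_pos_iff.mpr hne
  simp only [PySem.List.slice, PySem.List.clampIdx]
  rw [List.dropLast_eq_take]
  norm_num
  rw [if_neg (pvSplit_ne_nil [] sentence.toList)]
  have h1 : 1 ≤ (pvSplit [] sentence.toList).length :=
    List.length_pos_iff.mpr (pvSplit_ne_nil [] sentence.toList)
  omega

-- ===== VERDICT (by name: the statement is the Claim_ definition above) =====
theorem listSentence_spec : Claim_equal_listSentence := by
  intro sentence _
  unfold Spec_listSentence listSentence
  rw [foldA_eq sentence.toList [] [], alt_eq_dropLast]
  simp [List.map_dropLast]
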